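-- pv_equiv track=rewrite | github.com/leoschn/Detectability | generate_dataset.py | tryptic_digest
-- ===== SOURCE A (Python) =====
-- def tryptic_digest(sequence, miscleavages=0, min_length=0, max_length=10000):
--     cleavage_sites = [0]
--     for i in range(len(sequence) - 1):
--         if sequence[i] in ['K', 'R'] and sequence[i+1] != 'P':
--             #Règle : clivage après K ou R sauf si suivi de P.
--             cleavage_sites.append(i + 1)
--     cleavage_sites.append(len(sequence))
--
--     peptides = []
--     for i in range(len(cleavage_sites) - 1):
--         for j in range(i + 1, min(i + miscleavages + 2, len(cleavage_sites))):
--             start = cleavage_sites[i]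
--             end = cleavage_sites[j]
--             peptide = sequence[start:end]
--             if min_length <= len(peptide) <= max_length:
--                 peptides.append(peptide)
--     return peptides
-- ===== SOURCE B (Python) =====
-- def tryptic_digest(sequence, miscleavages=0, min_length=0, max_length=10000):
--     # Phase 1: split the sequence once into the base tryptic fragments (a partition):
--     # walk adjacent character pairs, closing the current fragment after K/R not followed by P.
--     fragments, cur = [], ''
--     for c, d in zip(sequence, sequence[1:]):
--         if c in 'KR' and d != 'P':
--             fragments.append(cur + c)
--             cur = ''
--         else:
--             cur += c
--     fragments.append(cur + sequence[-1:])
--     # Phase 2: each peptide is the join of a nonempty run of consecutive fragments,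
--     # at most miscleavages+1 of them; enumerate runs by suffix, growing a concatenation.
--     def runs(frags, budget):
--         out, pep = [], ''
--         for f in frags:
--             if budget <= 0:
--                 break
--             pep += f
--             if min_length <= len(pep) <= max_length:
--                 out.append(pep)
--             budget -= 1
--         return out
--     peptides = []
--     for k in range(len(fragments)):
--         peptides += runs(fragments[k:], miscleavages + 1)
--     return peptides
-- ===== Notes on version B (the rewrite author's own statement) =====
-- stated objective: alternative
-- what changed: B splits the sequence once into base tryptic fragment strings by walking adjacent character pairs, then enumerates peptides as joins of bounded runs of consecutive fragments over the suffixes of the fragment list, instead of A's integer cleavage-position list with a doubly-indexed re-slice of the original sequence for each candidate.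
import Mathlib
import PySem

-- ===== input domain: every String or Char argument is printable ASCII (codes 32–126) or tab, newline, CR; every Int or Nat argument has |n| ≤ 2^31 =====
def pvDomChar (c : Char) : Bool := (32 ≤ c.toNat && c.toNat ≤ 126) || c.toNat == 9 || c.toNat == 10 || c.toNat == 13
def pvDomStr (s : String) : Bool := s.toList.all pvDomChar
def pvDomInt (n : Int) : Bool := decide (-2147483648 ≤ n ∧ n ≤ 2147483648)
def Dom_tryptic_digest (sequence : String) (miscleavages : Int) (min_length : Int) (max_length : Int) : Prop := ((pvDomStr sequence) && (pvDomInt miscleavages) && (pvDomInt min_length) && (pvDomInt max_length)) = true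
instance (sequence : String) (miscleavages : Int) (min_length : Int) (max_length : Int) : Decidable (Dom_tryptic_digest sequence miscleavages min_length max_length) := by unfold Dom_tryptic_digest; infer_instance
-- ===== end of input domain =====

-- B replaces A's integer cleavage-position list + doubly-indexed re-slicing by a recursive split
-- into fragment strings followed by runs of consecutive fragments over the suffixes of the
-- fragment list (objective: alternative, same asymptotic cost).

-- ===== PORT A =====
-- literal port of Source A; strings are handled on the List Char side (PySem convention), peptides wrapped
-- with String.ofList when appended; sequence[i] is pyGetD (every index the loop touches is in range).
def tryptic_digest (sequence : String) (miscleavages : Int) (min_length : Int) (max_length : Int) : List String :=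
  let cs := sequence.toList
  let n : Int := cs.length
  let sites : List Int :=
    ((PySem.List.pyRange 0 (n - 1) 1).foldl
      (fun acc i =>
        if (PySem.List.pyGetD cs i ' ' == 'K' || PySem.List.pyGetD cs i ' ' == 'R')
            && !(PySem.List.pyGetD cs (i + 1) ' ' == 'P')
        then acc ++ [i + 1] else acc)
      [0]) ++ [n]
  let m : Int := sites.length
  (PySem.List.pyRange 0 (m - 1) 1).foldl
    (fun peps i =>
      (PySem.List.pyRange (i + 1) (min (i + miscleavages + 2) m) 1).foldl
        (fun peps j =>
          let s := PySem.List.pyGetD sites i 0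
          let e := PySem.List.pyGetD sites j 0
          let pep := PySem.List.slice cs (some s) (some e)
          if min_length ≤ (pep.length : Int) && (pep.length : Int) ≤ max_length
          then peps ++ [String.ofList pep] else peps)
        peps)
    []

-- ===== PORT B =====
-- literal port of Source B.
-- phase 1: walk adjacent character pairs, closing the current fragment after K/R not followed by P
-- (the zip loop of Source B as structural recursion on the two leading characters; the final
-- 'cur + sequence[-1:]' is the [c]/[] base cases).
def pvFragsB : List Char → List Char → List (List Char)
  | cur, c :: d :: rest =>
      if (c == 'K' || c == 'R') && !(d == 'P')
      then (cur ++ [c]) :: pvFragsB [] (d :: rest)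
      else pvFragsB (cur ++ [c]) (d :: rest)
  | cur, [c] => [cur ++ [c]]
  | cur, [] => [cur]

-- phase 2 helper 'runs': grow a concatenation over the fragments while budget lasts.
def pvRuns (lo hi : Int) : List Char → Int → List (List Char) → List String
  | _, _, [] => []
  | pep, budget, f :: rest =>
      if budget ≤ 0 then []
      else
        let pep' := pep ++ f
        (if lo ≤ (pep'.length : Int) && (pep'.length : Int) ≤ hi
         then [String.ofList pep'] else [])
        ++ pvRuns lo hi pep' (budget - 1) rest

-- the suffixes fragments[k:] of Source B's outer loop
def pvTails : List (List Char) → List (List (List Char))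
  | [] => []
  | f :: rest => (f :: rest) :: pvTails rest

def tryptic_digest_alt (sequence : String) (miscleavages : Int) (min_length : Int) (max_length : Int) : List String :=
  let frags := pvFragsB [] sequence.toList
  (pvTails frags).flatMap (fun t => pvRuns min_length max_length [] (miscleavages + 1) t)

-- ===== PRECONDITION & SPEC =====
def Spec_tryptic_digest (sequence : String) (miscleavages : Int) (min_length : Int) (max_length : Int) (out : List String) : Prop := out = tryptic_digest_alt sequence miscleavages min_length max_length
instance (sequence : String) (miscleavages : Int) (min_length : Int) (max_length : Int) (out : List String) : Decidable (Spec_tryptic_digest sequence miscleavages min_length max_length out) := by unfold Spec_tryptic_digest; infer_instance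

-- ===== CLAIM (what is proved, stated in full; the proofs are below) =====
def Claim_equal_tryptic_digest : Prop := ∀ (sequence : String) (miscleavages : Int) (min_length : Int) (max_length : Int), Dom_tryptic_digest sequence miscleavages min_length max_length → Spec_tryptic_digest sequence miscleavages min_length max_length (tryptic_digest sequence miscleavages min_length max_length)

-- ===== LEMMAS AND PROOFS =====

-- the cleavage test of port A, as a named condition
def pvCond (cs : List Char) (i : Int) : Bool :=
  (PySem.List.pyGetD cs i ' ' == 'K' || PySem.List.pyGetD cs i ' ' == 'R')
    && !(PySem.List.pyGetD cs (i + 1) ' ' == 'P')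

-- consecutive-pair slices of a boundary list: the fragments determined by sites
def pvSlicesOf (cs : List Char) : List Int → List (List Char)
  | a :: b :: t => PySem.List.slice cs (some a) (some b) :: pvSlicesOf cs (b :: t)
  | _ => []

theorem pvSlicesOf_length (cs : List Char) (l : List Int) (h : l ≠ []) :
    (pvSlicesOf cs l).length = l.length - 1 := by
  induction l with
  | nil => exact absurd rfl h
  | cons a t ih =>
    cases t with
    | nil => simp [pvSlicesOf]
    | cons b t' => simp [pvSlicesOf, ih]

theorem pvSlicesOf_getD (cs : List Char) (l : List Int) (k : Nat) (hk : k + 1 < l.length) :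
    (pvSlicesOf cs l).getD k [] =
      PySem.List.slice cs (some (l.getD k 0)) (some (l.getD (k+1) 0)) := by
  induction l generalizing k with
  | nil => simp at hk
  | cons a t ih =>
    cases t with
    | nil => simp at hk
    | cons b t' =>
      cases k with
      | zero => simp [pvSlicesOf]
      | succ k' =>
        simp only [pvSlicesOf, List.getD_cons_succ]
        exact ih k' (by simpa using hk)

-- slices over adjacent boundaries concatenate
theorem pvSlice_concat (cs : List Char) (p q r : Int) (hp : 0 ≤ p) (hpq : p ≤ q) (hqr : q ≤ r) :
    PySem.List.slice cs (some p) (some q) ++ PySem.List.slice cs (some q) (some r)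
      = PySem.List.slice cs (some p) (some r) := by
  rw [PySem.List.slice_toNat cs hp (le_trans hp hpq),
      PySem.List.slice_toNat cs (le_trans hp hpq) (le_trans (le_trans hp hpq) hqr),
      PySem.List.slice_toNat cs hp (le_trans hp (le_trans hpq hqr))]
  have h1 : cs.drop q.toNat = (cs.drop p.toNat).drop (q.toNat - p.toNat) := by
    rw [List.drop_drop]; congr 1; omega
  rw [h1, ← List.take_add]
  congr 1
  omega

-- monotone access into a (· ≤ ·)-pairwise list
theorem pvMono (sites : List Int) (hpair : sites.Pairwise (· ≤ ·)) (p q : Nat)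
    (hpq : p ≤ q) (hq : q < sites.length) :
    sites.getD p 0 ≤ sites.getD q 0 := by
  rcases Nat.lt_or_eq_of_le hpq with h | h
  · rw [List.getD_eq_getElem _ _ (by omega), List.getD_eq_getElem _ _ hq]
    exact List.pairwise_iff_getElem.mp hpair p q (by omega) hq h
  · subst h; exact le_refl _

theorem pvSliceSelf (cs : List Char) (p : Int) (hp : 0 ≤ p) :
    PySem.List.slice cs (some p) (some p) = [] := by
  rw [PySem.List.slice_toNat cs hp hp]
  simp

-- A's doubly-indexed inner loop as running concatenation over fragments, index shifted by one
theorem pvInner (cs : List Char) (sites : List Int) (lo hi : Int) (i b : Int)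
    (hpair : sites.Pairwise (· ≤ ·)) (hbd : ∀ x ∈ sites, 0 ≤ x)
    (hi0 : 0 ≤ i) (hb : b + 1 ≤ (sites.length : Int)) :
    ∀ (k : Nat) (a : Int) (pep : List Char) (peps : List String),
      (b - a).toNat = k → i ≤ a →
      pep = PySem.List.slice cs (some (PySem.List.pyGetD sites i 0))
              (some (PySem.List.pyGetD sites a 0)) →
      (PySem.List.pyRange (a+1) (b+1) 1).foldl
        (fun peps j =>
          if lo ≤ ((PySem.List.slice cs (some (PySem.List.pyGetD sites i 0)) (some (PySem.List.pyGetD sites j 0))).length : Int)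
              && ((PySem.List.slice cs (some (PySem.List.pyGetD sites i 0)) (some (PySem.List.pyGetD sites j 0))).length : Int) ≤ hi
          then peps ++ [String.ofList (PySem.List.slice cs (some (PySem.List.pyGetD sites i 0)) (some (PySem.List.pyGetD sites j 0)))]
          else peps) peps
      = ((PySem.List.pyRange a b 1).foldl
          (fun (q : List Char × List String) j =>
            if lo ≤ (((q.1 ++ PySem.List.pyGetD (pvSlicesOf cs sites) j []).length : Nat) : Int)
                && (((q.1 ++ PySem.List.pyGetD (pvSlicesOf cs sites) j []).length : Nat) : Int) ≤ hi
            then (q.1 ++ PySem.List.pyGetD (pvSlicesOf cs sites) j [],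
                  q.2 ++ [String.ofList (q.1 ++ PySem.List.pyGetD (pvSlicesOf cs sites) j [])])
            else (q.1 ++ PySem.List.pyGetD (pvSlicesOf cs sites) j [], q.2)) (pep, peps)).2 := by
  intro k
  induction k with
  | zero =>
    intro a pep peps hk hia hpep
    have hba : b ≤ a := by omega
    rw [PySem.List.pyRange_one_eq_nil (by omega), PySem.List.pyRange_one_eq_nil hba]
    simp
  | succ k' ih =>
    intro a pep peps hk hia hpep
    have hab : a < b := by omega
    rw [PySem.List.pyRange_one_cons (by omega), PySem.List.pyRange_one_cons hab]
    simp only [List.foldl_cons]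
    have ha0 : 0 ≤ a := le_trans hi0 hia
    have haL : a.toNat + 1 < sites.length := by omega
    have hsne : sites ≠ [] := by intro h; simp [h] at haL
    have hgt : ∀ x : Int, 0 ≤ x → PySem.List.pyGetD sites x 0 = sites.getD x.toNat 0 := by
      intro x hx
      conv_lhs => rw [show x = ((x.toNat : Nat) : Int) by omega]
      rw [PySem.List.pyGetD_natCast]
    have hfrag : PySem.List.pyGetD (pvSlicesOf cs sites) a []
        = PySem.List.slice cs (some (sites.getD a.toNat 0)) (some (sites.getD (a.toNat+1) 0)) := by
      conv_lhs => rw [show a = ((a.toNat : Nat) : Int) by omega]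
      rw [PySem.List.pyGetD_natCast]
      exact pvSlicesOf_getD cs sites a.toNat haL
    have hmem : ∀ k : Nat, k < sites.length → 0 ≤ sites.getD k 0 := by
      intro k hkL
      rw [List.getD_eq_getElem _ _ hkL]
      exact hbd _ (List.getElem_mem hkL)
    have hpep' : pep ++ PySem.List.pyGetD (pvSlicesOf cs sites) a []
        = PySem.List.slice cs (some (PySem.List.pyGetD sites i 0)) (some (PySem.List.pyGetD sites (a+1) 0)) := by
      rw [hpep, hfrag, hgt i hi0, hgt a ha0, hgt (a+1) (by omega)]
      rw [show (a+1).toNat = a.toNat + 1 by omega]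
      exact pvSlice_concat cs _ _ _ (hmem i.toNat (by omega))
        (pvMono sites hpair i.toNat a.toNat (by omega) (by omega))
        (pvMono sites hpair a.toNat (a.toNat+1) (by omega) haL)
    rw [hpep']
    by_cases hC : (decide (lo ≤ ((PySem.List.slice cs (some (PySem.List.pyGetD sites i 0)) (some (PySem.List.pyGetD sites (a+1) 0))).length : Int))
        && decide (((PySem.List.slice cs (some (PySem.List.pyGetD sites i 0)) (some (PySem.List.pyGetD sites (a+1) 0))).length : Int) ≤ hi)) = true
    · simp only [hC, if_true]
      exact ih (a+1) _ _ (by omega) (by omega) rfl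
    · simp only [hC, if_false, Bool.false_eq_true]
      exact ih (a+1) _ _ (by omega) (by omega) rfl

-- named forms of A's phase-1 fold (proof-side abbreviations, definitionally the port's code)
def pvAcc (cs : List Char) (c : Int → Bool) : List Int :=
  List.foldl (fun acc i => if c i then acc ++ [i+1] else acc) [0]
    (PySem.List.pyRange 0 ((cs.length : Int) - 1) 1)

def pvSitesOf (cs : List Char) (c : Int → Bool) : List Int :=
  pvAcc cs c ++ [(cs.length : Int)]

theorem pvAcc_eq (cs : List Char) (c : Int → Bool) :
    pvAcc cs c = [0] ++ ((PySem.List.pyRange 0 ((cs.length : Int) - 1) 1).filter c).map (· + 1) := by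
  unfold pvAcc; rw [PySem.List.foldl_append_if]

theorem pvSites_pairwise (cs : List Char) (c : Int → Bool) :
    (pvSitesOf cs c).Pairwise (· ≤ ·) ∧ (∀ x ∈ pvSitesOf cs c, 0 ≤ x) := by
  have hLp : ((PySem.List.pyRange 0 ((cs.length : Int) - 1) 1).filter c).Pairwise (· < ·) :=
    (PySem.List.pairwise_lt_pyRange_one _ _).filter c
  have hLm : ∀ x ∈ (PySem.List.pyRange 0 ((cs.length : Int) - 1) 1).filter c,
      0 ≤ x ∧ x < (cs.length : Int) - 1 := by
    intro x hx
    have := List.mem_of_mem_filter hx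
    rw [PySem.List.mem_pyRange_one] at this; exact this
  have hMp : (((PySem.List.pyRange 0 ((cs.length : Int) - 1) 1).filter c).map (· + 1)).Pairwise (· ≤ ·) := by
    rw [List.pairwise_map]
    exact hLp.imp (by intro a b h; omega)
  have hMb : ∀ x ∈ ((PySem.List.pyRange 0 ((cs.length : Int) - 1) 1).filter c).map (· + 1),
      0 ≤ x ∧ x ≤ (cs.length : Int) := by
    intro x hx
    obtain ⟨y, hy, rfl⟩ := List.mem_map.mp hx
    have := hLm y hy; omega
  unfold pvSitesOf
  rw [pvAcc_eq]
  constructor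
  · refine List.pairwise_append.mpr ⟨?_, by simp, ?_⟩
    · refine List.pairwise_append.mpr ⟨by simp, hMp, ?_⟩
      intro x hx y hy
      simp at hx; subst hx
      exact (hMb y hy).1
    · intro x hx _ hy
      simp at hy; subst hy
      rcases List.mem_append.mp hx with h | h
      · simp at h; omega
      · exact (hMb x h).2
  · intro x hx
    rcases List.mem_append.mp hx with h | h
    · rcases List.mem_append.mp h with h' | h'
      · simp at h'; omega
      · exact (hMb x h').1
    · simp at h; omega

-- A's whole program, expressed over the fragments pvSlicesOf cs (pvSitesOf cs c)
theorem pvA_frag (cs : List Char) (c : Int → Bool) (misc lo hi : Int) :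
    List.foldl
      (fun peps i => List.foldl
        (fun peps j =>
          if lo ≤ ((PySem.List.slice cs (some (PySem.List.pyGetD (pvSitesOf cs c) i 0)) (some (PySem.List.pyGetD (pvSitesOf cs c) j 0))).length : Int)
             && ((PySem.List.slice cs (some (PySem.List.pyGetD (pvSitesOf cs c) i 0)) (some (PySem.List.pyGetD (pvSitesOf cs c) j 0))).length : Int) ≤ hi
          then peps ++ [String.ofList (PySem.List.slice cs (some (PySem.List.pyGetD (pvSitesOf cs c) i 0)) (some (PySem.List.pyGetD (pvSitesOf cs c) j 0)))]
          else peps)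
        peps (PySem.List.pyRange (i+1) (min (i + misc + 2) ((pvSitesOf cs c).length : Int)) 1))
      [] (PySem.List.pyRange 0 (((pvSitesOf cs c).length : Int) - 1) 1)
  = List.foldl
      (fun peps i => (List.foldl
        (fun (q : List Char × List String) j =>
          if lo ≤ ((q.1 ++ PySem.List.pyGetD (pvSlicesOf cs (pvSitesOf cs c)) j []).length : Int)
             && ((q.1 ++ PySem.List.pyGetD (pvSlicesOf cs (pvSitesOf cs c)) j []).length : Int) ≤ hi
          then (q.1 ++ PySem.List.pyGetD (pvSlicesOf cs (pvSitesOf cs c)) j [], q.2 ++ [String.ofList (q.1 ++ PySem.List.pyGetD (pvSlicesOf cs (pvSitesOf cs c)) j [])])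
          else (q.1 ++ PySem.List.pyGetD (pvSlicesOf cs (pvSitesOf cs c)) j [], q.2))
        ([], peps) (PySem.List.pyRange i (min (i + misc + 1) (((pvSlicesOf cs (pvSitesOf cs c)).length : Int))) 1)).2)
      [] (PySem.List.pyRange 0 ((pvSlicesOf cs (pvSitesOf cs c)).length : Int) 1) := by
  obtain ⟨hSpair, hS0⟩ := pvSites_pairwise cs c
  have hSne : pvSitesOf cs c ≠ [] := by unfold pvSitesOf; simp
  have hlenF : ((pvSlicesOf cs (pvSitesOf cs c)).length : Int) = ((pvSitesOf cs c).length : Int) - 1 := by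
    rw [pvSlicesOf_length cs _ hSne]
    have : 1 ≤ (pvSitesOf cs c).length := List.length_pos_iff.mpr hSne
    omega
  simp only [hlenF]
  apply PySem.List.foldl_congr_mem
  intro peps i him
  rw [PySem.List.mem_pyRange_one] at him
  have hM1 : 1 ≤ ((pvSitesOf cs c).length : Int) := by
    have : 1 ≤ (pvSitesOf cs c).length := List.length_pos_iff.mpr hSne
    omega
  have hmin : min (i + misc + 2) ((pvSitesOf cs c).length : Int)
      = min (i + misc + 1) (((pvSitesOf cs c).length : Int) - 1) + 1 := by omega
  rw [hmin]
  have hgi : 0 ≤ PySem.List.pyGetD (pvSitesOf cs c) i 0 := by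
    conv_rhs => rw [show i = ((i.toNat : Nat) : Int) by omega]
    rw [PySem.List.pyGetD_natCast, List.getD_eq_getElem _ _ (by omega)]
    exact hS0 _ (List.getElem_mem _)
  exact pvInner cs (pvSitesOf cs c) lo hi i
    (min (i + misc + 1) (((pvSitesOf cs c).length : Int) - 1)) hSpair hS0 him.1
    (by omega)
    (min (i + misc + 1) (((pvSitesOf cs c).length : Int) - 1) - i).toNat i [] peps rfl
    (le_refl i) (pvSliceSelf cs _ hgi).symm

-- ===== the fragment characterization: pvFragsB = pvSlicesOf of the sites =====

-- Nat-side slices of a boundary list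
def pvSlicesN (cs : List Char) : List Nat → List (List Char)
  | a :: b :: t => (cs.drop a).take (b - a) :: pvSlicesN cs (b :: t)
  | _ => []

theorem pvSlicesN_cast (cs : List Char) (l : List Nat) :
    pvSlicesOf cs (l.map (fun k : Nat => (k : Int))) = pvSlicesN cs l := by
  induction l with
  | nil => simp [pvSlicesOf, pvSlicesN]
  | cons a t ih =>
    cases t with
    | nil => simp [pvSlicesOf, pvSlicesN]
    | cons b t' =>
      simp only [List.map_cons] at *
      simp only [pvSlicesOf, pvSlicesN]
      rw [PySem.List.slice_natCast, ih]

-- the Nat boundary list from position q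
theorem pvFragsB_char (cs : List Char) :
    ∀ (tail : List Char) (p q : Nat) (cur : List Char),
      q ≤ cs.length → cs.drop q = tail → p ≤ q → cur = (cs.drop p).take (q - p) →
      pvFragsB cur tail
        = pvSlicesN cs (p :: (((List.range' q (cs.length - 1 - q)).filter
            (fun (k : Nat) => pvCond cs (k : Int))).map (· + 1) ++ [cs.length])) := by
  intro tail
  induction tail with
  | nil =>
    intro p q cur hq hdrop hpq hcur
    have hqn : q = cs.length := by
      have := congrArg List.length hdrop
      simp at this; omega
    subst hqn
    have : cs.length - 1 - cs.length = 0 := by omega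
    rw [this]
    simp [pvFragsB, pvSlicesN, hcur]
  | cons d1 tl ih =>
    intro p q cur hq hdrop hpq hcur
    have hlen := congrArg List.length hdrop
    simp at hlen
    have hqlt : q < cs.length := by omega
    have hget1 : cs[q]'hqlt = d1 := by
      have h0 : (cs.drop q)[0]? = some d1 := by rw [hdrop]; rfl
      rw [List.getElem?_drop] at h0
      simp only [Nat.add_zero, List.getElem?_eq_getElem hqlt] at h0
      exact Option.some.inj h0
    have hcur1 : cur ++ [d1] = (cs.drop p).take (q + 1 - p) := by
      rw [show q + 1 - p = (q - p) + 1 by omega, List.take_add_one]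
      rw [List.getElem?_drop, show p + (q - p) = q by omega]
      rw [List.getElem?_eq_getElem hqlt, hget1, hcur]
      rfl
    cases tl with
    | nil =>
      have hqn : q + 1 = cs.length := by simp at hlen; omega
      have : cs.length - 1 - q = 0 := by omega
      rw [this]
      simp only [List.range'_zero, List.filter_nil, List.map_nil, List.nil_append]
      simp only [pvFragsB, pvSlicesN]
      rw [hcur1, hqn]
    | cons d2 rest =>
      have hq1lt : q + 1 < cs.length := by simp at hlen; omega
      have hget2 : cs[q+1]'hq1lt = d2 := by
        have h0 : (cs.drop q)[1]? = some d2 := by rw [hdrop]; rfl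
        rw [List.getElem?_drop] at h0
        simp only [List.getElem?_eq_getElem hq1lt] at h0
        exact Option.some.inj h0
      have hdrop' : cs.drop (q + 1) = d2 :: rest := by
        rw [← List.tail_drop, hdrop]; rfl
      have hcond : pvCond cs (q : Int) = ((d1 == 'K' || d1 == 'R') && !(d2 == 'P')) := by
        unfold pvCond
        rw [show ((q : Int) + 1) = ((q + 1 : Nat) : Int) by push_cast; ring]
        rw [PySem.List.pyGetD_natCast, PySem.List.pyGetD_natCast,
            List.getD_eq_getElem _ _ hqlt, List.getD_eq_getElem _ _ hq1lt, hget1, hget2]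
      have hrange : List.range' q (cs.length - 1 - q)
          = q :: List.range' (q + 1) (cs.length - 1 - (q + 1)) := by
        rw [show cs.length - 1 - q = (cs.length - 1 - (q + 1)) + 1 by omega, List.range'_succ]
      rw [hrange]
      simp only [List.filter_cons, hcond]
      by_cases hC : ((d1 == 'K' || d1 == 'R') && !(d2 == 'P')) = true
      · simp only [hC, if_true]
        simp only [pvFragsB, hC, if_true, List.map_cons, List.cons_append]
        rw [ih (q + 1) (q + 1) [] (by omega) hdrop' (le_refl _) (by simp)]
        simp only [pvSlicesN]
        rw [hcur1]
      · simp only [hC]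
        simp only [pvFragsB, hC, Bool.false_eq_true, if_false]
        exact ih p (q + 1) (cur ++ [d1]) (by omega) hdrop' (by omega) hcur1

-- Int boundaries of A are the cast Nat boundaries
theorem pvSites_cast (cs : List Char) :
    pvSitesOf cs (pvCond cs)
      = (0 :: (((List.range' 0 (cs.length - 1)).filter
          (fun (k : Nat) => pvCond cs (k : Int))).map (· + 1) ++ [cs.length])).map (fun k : Nat => (k : Int)) := by
  have hrange : PySem.List.pyRange 0 ((cs.length : Int) - 1) 1
      = (List.range' 0 (cs.length - 1)).map (fun k : Nat => (k : Int)) := by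
    rw [PySem.List.pyRange_one, List.range'_eq_map_range,
        show ((cs.length : Int) - 1 - 0).toNat = cs.length - 1 by omega, List.map_map]
    simp
  unfold pvSitesOf
  rw [pvAcc_eq, hrange, List.filter_map]
  simp only [List.map_cons, List.map_append, List.map_map, List.map_nil]
  simp only [Function.comp_def]
  push_cast
  simp

theorem pvFrags_eq (cs : List Char) :
    pvFragsB [] cs = pvSlicesOf cs (pvSitesOf cs (pvCond cs)) := by
  rw [pvSites_cast, pvSlicesN_cast]
  exact pvFragsB_char cs cs 0 0 [] (by omega) (by simp) (le_refl 0) (by simp)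

-- ===== the loop-shape bridge: the doubly-indexed fold over fragments = tails/runs =====

theorem pvRuns_shape (frags : List (List Char)) (lo hi : Int) :
    ∀ (l : List (List Char)) (i : Nat), frags.drop i = l → ∀ (b : Int) (pep : List Char) (peps : List String),
      (List.foldl
        (fun (q : List Char × List String) j =>
          if lo ≤ ((q.1 ++ PySem.List.pyGetD frags j []).length : Int)
             && ((q.1 ++ PySem.List.pyGetD frags j []).length : Int) ≤ hi
          then (q.1 ++ PySem.List.pyGetD frags j [], q.2 ++ [String.ofList (q.1 ++ PySem.List.pyGetD frags j [])])
          else (q.1 ++ PySem.List.pyGetD frags j [], q.2))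
        (pep, peps) (PySem.List.pyRange (i : Int) (min ((i : Int) + b) ((frags.length : Int))) 1)).2
      = peps ++ pvRuns lo hi pep b l := by
  intro l
  induction l with
  | nil =>
    intro i hdrop b pep peps
    have hlen : frags.length ≤ i := by
      have := congrArg List.length hdrop
      simp at this; omega
    rw [PySem.List.pyRange_one_eq_nil (by omega)]
    simp [pvRuns]
  | cons f rest ih =>
    intro i hdrop b pep peps
    have hlen := congrArg List.length hdrop
    simp at hlen
    have hilt : i < frags.length := by omega
    by_cases hb : b ≤ 0
    · rw [PySem.List.pyRange_one_eq_nil (by omega)]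
      simp [pvRuns, hb]
    · have hf : PySem.List.pyGetD frags (i : Int) [] = f := by
        rw [PySem.List.pyGetD_natCast, List.getD_eq_getElem _ _ hilt]
        have h0 : (frags.drop i)[0]? = some f := by rw [hdrop]; rfl
        rw [List.getElem?_drop] at h0
        simp only [Nat.add_zero, List.getElem?_eq_getElem hilt] at h0
        exact Option.some.inj h0
      have hdrop' : frags.drop (i + 1) = rest := by
        rw [← List.tail_drop, hdrop]; rfl
      rw [PySem.List.pyRange_one_cons (by omega)]
      simp only [List.foldl_cons, hf]
      rw [show ((i : Int) + 1) = ((i + 1 : Nat) : Int) by push_cast; ring,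
          show ((i : Int) + b) = ((i + 1 : Nat) : Int) + (b - 1) by push_cast; ring]
      by_cases hC : (decide (lo ≤ ((pep ++ f).length : Int))
          && decide (((pep ++ f).length : Int) ≤ hi)) = true
      · simp only [hC, if_true]
        rw [ih (i + 1) hdrop' (b - 1) (pep ++ f) (peps ++ [String.ofList (pep ++ f)])]
        simp only [pvRuns, if_neg hb, hC, if_true, List.append_assoc, List.cons_append,
          List.nil_append]
      · simp only [hC, Bool.false_eq_true, if_false]
        rw [ih (i + 1) hdrop' (b - 1) (pep ++ f) peps]
        simp only [pvRuns, if_neg hb, hC, Bool.false_eq_true, if_false, List.nil_append]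

theorem pvTails_eq_map (frags : List (List Char)) :
    pvTails frags = (List.range frags.length).map (fun k => frags.drop k) := by
  induction frags with
  | nil => simp [pvTails]
  | cons f rest ih =>
    simp only [pvTails, List.length_cons, List.range_succ_eq_map, List.map_cons, List.map_map]
    rw [ih]
    simp [Function.comp_def]

theorem pvOuter_shape (frags : List (List Char)) (misc lo hi : Int) :
    List.foldl
      (fun peps i => (List.foldl
        (fun (q : List Char × List String) j =>
          if lo ≤ ((q.1 ++ PySem.List.pyGetD frags j []).length : Int)
             && ((q.1 ++ PySem.List.pyGetD frags j []).length : Int) ≤ hi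
          then (q.1 ++ PySem.List.pyGetD frags j [], q.2 ++ [String.ofList (q.1 ++ PySem.List.pyGetD frags j [])])
          else (q.1 ++ PySem.List.pyGetD frags j [], q.2))
        ([], peps) (PySem.List.pyRange i (min (i + misc + 1) ((frags.length : Int))) 1)).2)
      [] (PySem.List.pyRange 0 ((frags.length : Int)) 1)
    = (pvTails frags).flatMap (fun t => pvRuns lo hi [] (misc + 1) t) := by
  have hbody : ∀ (peps : List String), ∀ i ∈ PySem.List.pyRange 0 ((frags.length : Int)) 1,
      (List.foldl
        (fun (q : List Char × List String) j =>
          if lo ≤ ((q.1 ++ PySem.List.pyGetD frags j []).length : Int)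
             && ((q.1 ++ PySem.List.pyGetD frags j []).length : Int) ≤ hi
          then (q.1 ++ PySem.List.pyGetD frags j [], q.2 ++ [String.ofList (q.1 ++ PySem.List.pyGetD frags j [])])
          else (q.1 ++ PySem.List.pyGetD frags j [], q.2))
        ([], peps) (PySem.List.pyRange i (min (i + misc + 1) ((frags.length : Int))) 1)).2
        = peps ++ pvRuns lo hi [] (misc + 1) (frags.drop i.toNat) := by
    intro peps i him
    rw [PySem.List.mem_pyRange_one] at him
    rw [show i = ((i.toNat : Nat) : Int) by omega]
    simp only [Int.toNat_natCast]
    rw [show (((i.toNat : Nat) : Int) + misc + 1) = ((i.toNat : Nat) : Int) + (misc + 1) by ring]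
    exact pvRuns_shape frags lo hi (frags.drop i.toNat) i.toNat rfl (misc + 1) [] peps
  rw [PySem.List.foldl_congr_mem _ _
        (fun peps i => peps ++ pvRuns lo hi [] (misc + 1) (frags.drop i.toNat)) _ hbody,
      PySem.List.foldl_append_eq_flatMap, List.nil_append,
      PySem.List.pyRange_zero_natCast, List.flatMap_map, pvTails_eq_map, List.flatMap_map]
  simp

-- ===== VERDICT (by name: the statement is the Claim_ definition above) =====
theorem tryptic_digest_spec : Claim_equal_tryptic_digest := by
  intro seq misc lo hi _
  show tryptic_digest seq misc lo hi = tryptic_digest_alt seq misc lo hi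
  have h2 := pvOuter_shape (pvSlicesOf seq.toList (pvSitesOf seq.toList (pvCond seq.toList))) misc lo hi
  rw [show tryptic_digest_alt seq misc lo hi
        = (pvTails (pvFragsB [] seq.toList)).flatMap (fun t => pvRuns lo hi [] (misc + 1) t) from rfl,
      pvFrags_eq]
  exact (pvA_frag seq.toList (pvCond seq.toList) misc lo hi).trans h2
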